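-- pv_equiv track=rewrite | github.com/daormar/geno-debasher | utils/query_ega_metadata.py | extract_attribute_info
-- ===== SOURCE A (Python) =====
-- ATTR_NOT_FOUND="ATTR_NOT_FOUND"
--
-- def extract_attribute_info(line):
--     fields=line.split()
--     # Remove blanks from attributes
--     attribute_str=""
--     for i in range(1,len(fields)):
--         if i>1:
--             attribute_str=attribute_str+"_"
--         attribute_str=attribute_str+fields[i]
--
--     # Initialize output values
--     donor_id=ATTR_NOT_FOUND
--     phenotype=ATTR_NOT_FOUND
--     gender=ATTR_NOT_FOUND
--
--     # Iterate over attributes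
--     attr_fields=attribute_str.split(";")
--     for attr_field in attr_fields:
--         # Extract key-value information
--         keyvalue=attr_field.split("=")
--         if len(keyvalue)==2:
--             key=keyvalue[0]
--             value=keyvalue[1]
--             if(key=="donor_id"):
--                 donor_id=attr_field
--             elif(key=="phenotype"):
--                 phenotype=attr_field
--             elif(key=="gender"):
--                 gender=attr_field
--
--     return (donor_id,phenotype,gender)
-- ===== SOURCE B (Python) =====
-- ATTR_NOT_FOUND="ATTR_NOT_FOUND"
--
-- def _last_attr(pieces, key):
--     # scan back-to-front; the first hit is the last occurrence in the line
--     for piece in reversed(pieces):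
--         keyvalue = piece.split("=")
--         if len(keyvalue) == 2 and keyvalue[0] == key:
--             return piece
--     return ATTR_NOT_FOUND
--
-- def extract_attribute_info(line):
--     pieces = "_".join(line.split()[1:]).split(";")
--     return (_last_attr(pieces, "donor_id"),
--             _last_attr(pieces, "phenotype"),
--             _last_attr(pieces, "gender"))
-- ===== Notes on version B (the rewrite author's own statement) =====
-- stated objective: alternative
-- what changed: A makes one forward pass routing every piece into three mutable accumulators (last assignment wins) after an index loop that glues fields with underscores; B joins the field slice with str.join and then answers each of the three keys by an independent backward scan over the semicolon-separated pieces that early-returns at the first (i.e. last) well-formed match, with no accumulators or routing pass.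
import Mathlib
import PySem

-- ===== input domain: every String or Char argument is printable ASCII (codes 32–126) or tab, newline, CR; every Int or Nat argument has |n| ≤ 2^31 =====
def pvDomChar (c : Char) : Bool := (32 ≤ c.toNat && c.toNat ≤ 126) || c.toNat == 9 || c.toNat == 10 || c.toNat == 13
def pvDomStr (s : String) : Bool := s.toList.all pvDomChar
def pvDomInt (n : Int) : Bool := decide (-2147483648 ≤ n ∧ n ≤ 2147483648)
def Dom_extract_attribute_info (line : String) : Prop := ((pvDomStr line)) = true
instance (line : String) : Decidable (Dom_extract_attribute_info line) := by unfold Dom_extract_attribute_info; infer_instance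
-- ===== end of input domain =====

-- B replaces A's single forward routing pass into three mutable accumulators by three
-- independent backward scans that early-return at the first (= last) well-formed match,
-- and A's index loop gluing fields with '_' by a join over the field slice; objective: alternative.

-- ===== PORT A =====
-- A's loop body over attr_fields (routes the whole 'key=value' piece into one of three slots).
def pvStepA (st : List Char × List Char × List Char) (attr_field : List Char) :
    List Char × List Char × List Char :=
  let keyvalue := PySem.Chars.splitOn attr_field "=".toList
  if keyvalue.length = 2 then
    let key := PySem.List.pyGetD keyvalue 0 []
    -- A also binds value = keyvalue[1] but never uses it
    if key = "donor_id".toList then (attr_field, st.2.1, st.2.2)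
    else if key = "phenotype".toList then (st.1, attr_field, st.2.2)
    else if key = "gender".toList then (st.1, st.2.1, attr_field)
    else st
  else st

-- A's underscore-join loop: for i in range(1, len(fields)): …
def pvAttrStrA (fields : List (List Char)) : List Char :=
  (PySem.List.pyRange 1 (fields.length : Int)).foldl
    (fun s i => (if (1 : Int) < i then s ++ "_".toList else s) ++ PySem.List.pyGetD fields i [])
    []

def extract_attribute_info (line : String) : String × String × String :=
  let fields := PySem.Chars.split₀ line.toList
  let attribute_str := pvAttrStrA fields
  let attr_fields := PySem.Chars.splitOn attribute_str ";".toList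
  let res := attr_fields.foldl pvStepA
    ("ATTR_NOT_FOUND".toList, "ATTR_NOT_FOUND".toList, "ATTR_NOT_FOUND".toList)
  (String.ofList res.1, String.ofList res.2.1, String.ofList res.2.2)

-- ===== PORT B =====
-- B's _last_attr loop body: walk the reversed piece list, early-return at the first match.
def pvLastAttrGo (key : List Char) : List (List Char) → List Char
  | [] => "ATTR_NOT_FOUND".toList
  | piece :: rest =>
    let keyvalue := PySem.Chars.splitOn piece "=".toList
    if keyvalue.length = 2 ∧ PySem.List.pyGetD keyvalue 0 [] = key then piece
    else pvLastAttrGo key rest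

-- B's _last_attr(pieces, key): for piece in reversed(pieces): …
def pvLastAttr (pieces : List (List Char)) (key : List Char) : List Char :=
  pvLastAttrGo key pieces.reverse

def extract_attribute_info_alt (line : String) : String × String × String :=
  let pieces :=
    PySem.Chars.splitOn
      (PySem.Chars.join "_".toList (PySem.List.slice (PySem.Chars.split₀ line.toList) (some 1) none))
      ";".toList
  (String.ofList (pvLastAttr pieces "donor_id".toList),
   String.ofList (pvLastAttr pieces "phenotype".toList),
   String.ofList (pvLastAttr pieces "gender".toList))

-- ===== PRECONDITION & SPEC =====
def Spec_extract_attribute_info (line : String) (out : String × String × String) : Prop := out = extract_attribute_info_alt line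
instance (line : String) (out : String × String × String) : Decidable (Spec_extract_attribute_info line out) := by unfold Spec_extract_attribute_info; infer_instance

-- ===== CLAIM (what is proved, stated in full; the proofs are below) =====
def Claim_equal_extract_attribute_info : Prop := ∀ (line : String), Dom_extract_attribute_info line → Spec_extract_attribute_info line (extract_attribute_info line)

-- ===== LEMMAS AND PROOFS =====

lemma intercalate_cons_cons' (sep a b : List Char) (l : List (List Char)) :
    sep.intercalate (a :: b :: l) = a ++ sep ++ sep.intercalate (b :: l) := by
  simp [List.intercalate, List.intersperse]

lemma intercalate_append_singleton (sep : List Char) (xs : List (List Char)) (x : List Char) :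
    sep.intercalate (xs ++ [x]) = if xs = [] then x else sep.intercalate xs ++ sep ++ x := by
  induction xs with
  | nil => simp [List.intercalate]
  | cons h t ih =>
    cases t with
    | nil =>
      simp only [List.cons_append, List.nil_append, intercalate_cons_cons']
      simp [List.intercalate, List.intersperse]
    | cons h2 t2 =>
      simp only [List.cons_append] at *
      rw [intercalate_cons_cons', ih, if_neg (by simp), intercalate_cons_cons']
      simp

-- A's underscore-join loop over range(1, len(fields)) computes '_'.join(fields[1:]).
lemma joinA_eq (f0 : List Char) (xs : List (List Char)) :
    pvAttrStrA (f0 :: xs) = "_".toList.intercalate xs := by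
  unfold pvAttrStrA
  induction xs using List.reverseRecOn with
  | nil =>
    simp [PySem.List.pyRange, List.intercalate]
  | append_singleton t x ih =>
    have hlen : (((f0 :: (t ++ [x])).length : Int)) = ((f0 :: t).length : Int) + 1 := by
      push_cast [List.length_append, List.length_cons, List.length_nil]; ring
    rw [hlen, PySem.List.pyRange_one_succ_right (by simp), List.foldl_append]
    have hcongr :
        (PySem.List.pyRange 1 ((f0 :: t).length : Int)).foldl
          (fun s i => (if (1 : Int) < i then s ++ "_".toList else s) ++ PySem.List.pyGetD (f0 :: (t ++ [x])) i [])
          []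
        = (PySem.List.pyRange 1 ((f0 :: t).length : Int)).foldl
          (fun s i => (if (1 : Int) < i then s ++ "_".toList else s) ++ PySem.List.pyGetD (f0 :: t) i [])
          [] := by
      apply PySem.List.foldl_congr_mem
      intro acc i hi
      rw [PySem.List.mem_pyRange_one] at hi
      have h1 : (0 : Int) ≤ i := by omega
      have h2 : i.toNat < (f0 :: t).length := by
        simp only [List.length_cons] at hi ⊢; omega
      rw [PySem.List.pyGetD_of_nonneg _ _ h1, PySem.List.pyGetD_of_nonneg _ _ h1]
      have he : (f0 :: (t ++ [x])) = (f0 :: t) ++ [x] := by simp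
      rw [he, List.getD_append _ _ _ _ h2]
    rw [hcongr, ih]
    simp only [List.foldl_cons, List.foldl_nil]
    have hget : PySem.List.pyGetD (f0 :: (t ++ [x])) ((f0 :: t).length : Int) [] = x := by
      rw [PySem.List.pyGetD_of_nonneg _ _ (by positivity)]
      have he : (f0 :: (t ++ [x])) = (f0 :: t) ++ [x] := by simp
      rw [he]
      simp [List.getD]
    rw [hget, intercalate_append_singleton]
    rcases t with _ | ⟨h1, t1⟩
    · norm_num [List.intercalate]
    · have hc : (1 : Int) < ((f0 :: h1 :: t1).length : Int) := by
        simp only [List.length_cons]; push_cast; omega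
      rw [if_pos hc, if_neg (by simp)]

-- A's attribute_str equals B's '_'.join(fields[1:]).
lemma attrstr_eq (fields : List (List Char)) :
    pvAttrStrA fields
    = PySem.Chars.join "_".toList (PySem.List.slice fields (some 1) none) := by
  rw [PySem.List.slice_from _ (by norm_num)]
  rcases fields with _ | ⟨f0, xs⟩
  · simp [pvAttrStrA, PySem.List.pyRange, PySem.Chars.join, List.intercalate]
  · simpa [PySem.Chars.join] using joinA_eq f0 xs

-- proof helper: B's backward scan with an arbitrary fallback value
def pvScan (key dflt : List Char) : List (List Char) → List Char
  | [] => dflt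
  | piece :: rest =>
    if (PySem.Chars.splitOn piece "=".toList).length = 2 ∧
        PySem.List.pyGetD (PySem.Chars.splitOn piece "=".toList) 0 [] = key then piece
    else pvScan key dflt rest

lemma pvLastAttrGo_eq_scan (key : List Char) (l : List (List Char)) :
    pvLastAttrGo key l = pvScan key "ATTR_NOT_FOUND".toList l := by
  induction l with
  | nil => rfl
  | cons p t ih => simp only [pvLastAttrGo, pvScan, ih]

lemma pvScan_append_singleton (key dflt a : List Char) (xs : List (List Char)) :
    pvScan key dflt (xs ++ [a])
    = pvScan key
        (if (PySem.Chars.splitOn a "=".toList).length = 2 ∧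
            PySem.List.pyGetD (PySem.Chars.splitOn a "=".toList) 0 [] = key then a else dflt)
        xs := by
  induction xs with
  | nil => simp [pvScan]
  | cons p t ih => simp only [List.cons_append, pvScan, ih]

-- A's routing step, read off component by component.
lemma pvStepA_components (st : List Char × List Char × List Char) (a : List Char) :
    pvStepA st a
    = ((if (PySem.Chars.splitOn a "=".toList).length = 2 ∧
          PySem.List.pyGetD (PySem.Chars.splitOn a "=".toList) 0 [] = "donor_id".toList then a else st.1),
       (if (PySem.Chars.splitOn a "=".toList).length = 2 ∧
          PySem.List.pyGetD (PySem.Chars.splitOn a "=".toList) 0 [] = "phenotype".toList then a else st.2.1),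
       (if (PySem.Chars.splitOn a "=".toList).length = 2 ∧
          PySem.List.pyGetD (PySem.Chars.splitOn a "=".toList) 0 [] = "gender".toList then a else st.2.2)) := by
  have hEq : "=".toList = ['='] := rfl
  have hD : "donor_id".toList = ['d','o','n','o','r','_','i','d'] := rfl
  have hP : "phenotype".toList = ['p','h','e','n','o','t','y','p','e'] := rfl
  have hG : "gender".toList = ['g','e','n','d','e','r'] := rfl
  simp only [pvStepA, hEq, hD, hP, hG]
  by_cases h2 : (PySem.Chars.splitOn a ['=']).length = 2
  · simp only [h2, if_true, true_and]
    by_cases hd : PySem.List.pyGetD (PySem.Chars.splitOn a ['=']) 0 [] = ['d','o','n','o','r','_','i','d']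
    · simp [hd]
    · by_cases hp : PySem.List.pyGetD (PySem.Chars.splitOn a ['=']) 0 [] = ['p','h','e','n','o','t','y','p','e']
      · simp [hp]
      · by_cases hg : PySem.List.pyGetD (PySem.Chars.splitOn a ['=']) 0 [] = ['g','e','n','d','e','r']
        · simp [hg]
        · simp [hd, hp, hg]
  · simp [h2]

-- A's forward routing fold equals three backward scans over the reversed piece list.
lemma foldA_eq_scans (l : List (List Char)) :
    ∀ (d p g : List Char),
      l.foldl pvStepA (d, p, g)
      = (pvScan "donor_id".toList d l.reverse,
         pvScan "phenotype".toList p l.reverse,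
         pvScan "gender".toList g l.reverse) := by
  induction l with
  | nil => intro d p g; rfl
  | cons a t ih =>
    intro d p g
    simp only [List.foldl_cons, List.reverse_cons]
    rw [pvStepA_components, ih,
        pvScan_append_singleton, pvScan_append_singleton, pvScan_append_singleton]

-- ===== VERDICT (by name: the statement is the Claim_ definition above) =====
theorem extract_attribute_info_spec : Claim_equal_extract_attribute_info := by
  unfold Claim_equal_extract_attribute_info Spec_extract_attribute_info
  intro line _
  show extract_attribute_info line = extract_attribute_info_alt line
  simp only [extract_attribute_info, extract_attribute_info_alt, pvLastAttr]
  rw [attrstr_eq, foldA_eq_scans,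
      pvLastAttrGo_eq_scan, pvLastAttrGo_eq_scan, pvLastAttrGo_eq_scan]
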